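-- pv_equiv track=rewrite | github.com/BruceChen07/AI-Law-Assistant | app/services/contract_audit_modules/trace_writer.py | _audit_file_tag
-- ===== SOURCE A (Python) =====
-- from typing import Dict, Any, Tuple
--
-- def _audit_file_tag(v: Any) -> str:
--     s = str(v or "").strip()
--     if not s:
--         return ""
--     out = []
--     for ch in s:
--         if ch.isalnum() or ch in ("-", "_"):
--             out.append(ch)
--         else:
--             out.append("_")
--     return "".join(out).strip("_")
-- ===== SOURCE B (Python) =====
-- def _audit_file_tag(v) -> str:
--     s = str(v or "").strip()
--     # Record the positions of the characters that survive a final strip("_"):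
--     # alphanumerics and '-'.  Everything between two such positions (underscores
--     # or disallowed characters) becomes '_' in the output, and everything before
--     # the first / after the last one is stripped, so the result can be emitted
--     # directly from the kept characters and the index gaps between them.
--     keep = [(i, ch) for i, ch in enumerate(s) if ch.isalnum() or ch == "-"]
--     if not keep:
--         return ""
--     parts = [keep[0][1]]
--     for (p, _), (c, ch) in zip(keep, keep[1:]):
--         parts.append("_" * (c - p - 1))
--         parts.append(ch)
--     return "".join(parts)
-- ===== Notes on version B (the rewrite author's own statement) =====
-- stated objective: alternative
-- what changed: Instead of substituting every character and then stripping underscores from both ends, B enumerates the positions of the characters that survive (alphanumerics and hyphen) and emits the result directly from those kept characters and the index gaps between them (each gap becomes a run of underscores), so no strip pass and no per-character branch loop remain.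
import Mathlib
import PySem

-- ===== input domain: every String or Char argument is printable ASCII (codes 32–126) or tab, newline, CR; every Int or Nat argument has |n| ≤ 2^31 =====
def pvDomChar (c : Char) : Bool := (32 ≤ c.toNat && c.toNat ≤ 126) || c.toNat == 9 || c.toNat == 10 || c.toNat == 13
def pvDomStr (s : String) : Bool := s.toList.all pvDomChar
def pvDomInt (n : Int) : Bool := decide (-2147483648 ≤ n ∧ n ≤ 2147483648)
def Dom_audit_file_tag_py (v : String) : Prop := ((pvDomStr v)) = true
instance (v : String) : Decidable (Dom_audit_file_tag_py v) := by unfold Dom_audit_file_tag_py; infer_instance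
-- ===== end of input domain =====

-- B changes the algorithm: instead of substituting every character and then stripping
-- underscores, it records the positions of the characters that survive (alphanumerics and
-- hyphen) and emits the result from those characters and the index gaps between them (alternative).

-- ===== PORT A =====
-- per-character loop: append ch if allowed, else an underscore; then strip underscores from both ends
def audit_file_tag_py (v : String) : String :=
  let s := PySem.Str.strip (if v == "" then "" else v)
  if s == "" then ""
  else
    let out : List Char := s.toList.foldl
      (fun acc ch =>
        if PySem.Chars.isalnum ch || (ch == '-' || ch == '_') then acc ++ [ch]
        else acc ++ ['_']) []
    PySem.Str.stripChars (String.ofList out) "_"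

-- ===== PORT B =====
-- kept positions (alnum or hyphen) + gap lengths between consecutive kept positions
def audit_file_tag_py_alt (v : String) : String :=
  let s := PySem.Str.strip (if v == "" then "" else v)
  let keep := (PySem.List.enumerate s.toList).filter
      (fun p => PySem.Chars.isalnum p.2 || p.2 == '-')
  match keep with
  | [] => ""
  | (_, c0) :: rest =>
    let parts : List String := (keep.zip rest).foldl
      (fun acc q =>
        acc ++ [String.ofList (List.replicate (q.2.1 - q.1.1 - 1).toNat '_'),
                String.ofList [q.2.2]])
      [String.ofList [c0]]
    PySem.Str.join "" parts

-- ===== PRECONDITION & SPEC =====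
def Spec_audit_file_tag_py (v : String) (out : String) : Prop := out = audit_file_tag_py_alt v
instance (v : String) (out : String) : Decidable (Spec_audit_file_tag_py v out) := by unfold Spec_audit_file_tag_py; infer_instance

-- ===== CLAIM (what is proved, stated in full; the proofs are below) =====
def Claim_equal_audit_file_tag_py : Prop := ∀ (v : String), Dom_audit_file_tag_py v → Spec_audit_file_tag_py v (audit_file_tag_py v)

-- ===== LEMMAS AND PROOFS =====

-- A's branch condition and substitution; B's keep condition
def pvAllowed (ch : Char) : Bool := PySem.Chars.isalnum ch || (ch == '-' || ch == '_')
def pvKeep (ch : Char) : Bool := PySem.Chars.isalnum ch || ch == '-'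
def pvF (ch : Char) : Char := if pvAllowed ch then ch else '_'

-- flattened form of B's parts after the first kept character
def pvEmit : Int → List (Int × Char) → List Char
  | _, [] => []
  | prev, (k, e) :: ks => List.replicate (k - prev - 1).toNat '_' ++ e :: pvEmit k ks

-- right trim by !pvKeep (the list form of what strip('_') does on the right of map pvF)
def pvRT (l : List Char) : List Char :=
  (List.dropWhile (fun c => !pvKeep c) l.reverse).reverse

theorem pvF_of_keep (c : Char) (h : pvKeep c = true) : pvF c = c := by
  have ha : pvAllowed c = true := by
    simp only [pvKeep, Bool.or_eq_true] at h
    simp only [pvAllowed, Bool.or_eq_true]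
    rcases h with h | h
    · exact Or.inl h
    · exact Or.inr (Or.inl h)
  simp [pvF, ha]

theorem pvF_eq_underscore_iff (c : Char) : (pvF c = '_') ↔ pvKeep c = false := by
  constructor
  · intro h
    cases hk : pvKeep c
    · rfl
    · rw [pvF_of_keep c hk] at h
      rw [h] at hk
      exact absurd hk (by decide)
  · intro h
    have h1 : PySem.Chars.isalnum c = false := by
      cases ha : PySem.Chars.isalnum c
      · rfl
      · simp [pvKeep, ha] at h
    have h2 : (c == '-') = false := by
      cases hb : c == '-'
      · rfl
      · simp [pvKeep, hb] at h
    by_cases hu : c = '_'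
    · subst hu; simp [pvF, pvAllowed]
    · have hA : pvAllowed c = false := by
        simp [pvAllowed, h1, h2, hu]
      simp [pvF, hA]

theorem pvContains_pvF (c : Char) :
    (['_'].contains (pvF c)) = !pvKeep c := by
  cases hk : pvKeep c
  · have := (pvF_eq_underscore_iff c).mpr hk
    simp [this]
  · have hne : pvF c ≠ '_' := fun he => by
      rw [(pvF_eq_underscore_iff c).mp he] at hk; cases hk
    simp [hne]

-- every index produced by enumerate-from-m is ≥ m
theorem pvFst_ge (t : List Char) (m : Int) (p : Int × Char)
    (hp : p ∈ (PySem.List.enumerate t m).filter (fun p => pvKeep p.2)) : m ≤ p.1 := by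
  have hm := List.mem_of_mem_filter hp
  rw [PySem.List.mem_enumerate_iff] at hm
  obtain ⟨k, hk, rfl⟩ := hm
  simp

theorem pvKeepNil_iff (t : List Char) (m : Int) :
    ((PySem.List.enumerate t m).filter (fun p => pvKeep p.2) = []) ↔
      (∀ c ∈ t, pvKeep c = false) := by
  rw [List.filter_eq_nil_iff]
  constructor
  · intro h c hc
    obtain ⟨k, hk, hck⟩ := List.mem_iff_getElem.mp hc
    have hmem : (m + k, t[k]) ∈ PySem.List.enumerate t m := by
      rw [PySem.List.mem_enumerate_iff]; exact ⟨k, hk, rfl⟩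
    have h2 := h _ hmem
    rw [hck] at h2
    simpa using h2
  · intro h p hp
    rw [PySem.List.mem_enumerate_iff] at hp
    obtain ⟨k, hk, rfl⟩ := hp
    simpa using h _ (List.getElem_mem hk)

theorem pvRT_nil_iff (t : List Char) :
    pvRT t = [] ↔ ∀ c ∈ t, pvKeep c = false := by
  simp [pvRT, List.dropWhile_eq_nil_iff]

-- cons equation for the right trim
theorem pvRT_cons (d : Char) (t : List Char) :
    pvRT (d :: t) = if pvRT t = [] then (if pvKeep d then [d] else []) else d :: pvRT t := by
  simp only [pvRT, List.reverse_cons, List.dropWhile_append]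
  by_cases h : List.dropWhile (fun c => !pvKeep c) t.reverse = []
  · simp [h]
    by_cases hd : pvKeep d <;> simp [hd, List.dropWhile]
  · have hne : (List.dropWhile (fun c => !pvKeep c) t.reverse).isEmpty = false := by
      simpa [List.isEmpty_iff] using h
    simp [hne, h]

-- core: the emitted tail equals the substituted right-trimmed remainder
theorem pvEmit_eq (t : List Char) : ∀ n : Int,
    pvEmit n ((PySem.List.enumerate t (n + 1)).filter (fun p => pvKeep p.2))
      = (pvRT t).map pvF := by
  induction t with
  | nil => intro n; simp [pvRT, pvEmit, PySem.List.enumerate]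
  | cons d t ih =>
    intro n
    rw [PySem.List.enumerate_cons, pvRT_cons]
    by_cases hd : pvKeep d = true
    · simp only [List.filter_cons, hd, if_pos]
      by_cases hRT : pvRT t = []
      · have hnil : (PySem.List.enumerate t (n + 1 + 1)).filter (fun p => pvKeep p.2) = [] :=
          (pvKeepNil_iff t _).mpr ((pvRT_nil_iff t).mp hRT)
        simp [pvEmit, hnil, hRT, pvF_of_keep d hd]
      · have hE := ih (n + 1)
        simp only [pvEmit]
        rw [show n + 1 - n - 1 = 0 by ring]
        simp only [Int.toNat_zero, List.replicate_zero, List.nil_append]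
        rw [show (n + 1 : Int) + 1 = n + 1 + 1 by ring] at hE
        simp [hRT, hE, pvF_of_keep d hd]
    · have hd' : pvKeep d = false := by revert hd; cases pvKeep d <;> simp
      simp only [List.filter_cons, hd', Bool.false_eq_true, ite_false]
      by_cases hRT : pvRT t = []
      · have hnil : (PySem.List.enumerate t (n + 1 + 1)).filter (fun p => pvKeep p.2) = [] :=
          (pvKeepNil_iff t _).mpr ((pvRT_nil_iff t).mp hRT)
        simp [pvEmit, hnil, hRT]
      · have hE := ih (n + 1)
        rw [show (n + 1 : Int) + 1 = n + 1 + 1 by ring] at hE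
        rcases hK : (PySem.List.enumerate t (n + 1 + 1)).filter (fun p => pvKeep p.2) with _ | ⟨⟨k, e⟩, ks⟩
        · exact absurd ((pvRT_nil_iff t).mpr ((pvKeepNil_iff t _).mp hK)) hRT
        · have hk2 : n + 1 + 1 ≤ k := by
            have hmem : (k, e) ∈ (PySem.List.enumerate t (n + 1 + 1)).filter (fun p => pvKeep p.2) := by
              rw [hK]; exact List.mem_cons_self
            exact pvFst_ge t _ _ hmem
          rw [hK] at hE
          rw [hK]
          simp only [pvEmit] at hE ⊢
          have hrep : (k - n - 1).toNat = (k - (n + 1) - 1).toNat + 1 := by omega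
          rw [hrep, List.replicate_succ]
          simp only [List.cons_append, hE]
          have hu : pvF d = '_' := (pvF_eq_underscore_iff d).mpr hd'
          simp [hRT, hu]

-- dropWhile of the substituted list = substitution of dropWhile !pvKeep
theorem pvDropWhile_map (x : List Char) :
    List.dropWhile (fun c => ['_'].contains c) (x.map pvF)
      = (List.dropWhile (fun c => !pvKeep c) x).map pvF := by
  rw [List.dropWhile_map]
  have hp : ((fun c => ['_'].contains c) ∘ pvF) = (fun c => !pvKeep c) :=
    funext fun c => pvContains_pvF c
  rw [hp]

-- generalized main lemma, with an arbitrary enumerate start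
theorem pvMain (l : List Char) : ∀ n : Int,
    ((pvRT (List.dropWhile (fun c => !pvKeep c) l)).map pvF)
      = (match (PySem.List.enumerate l n).filter (fun p => pvKeep p.2) with
         | [] => []
         | (k0, c0) :: rest => c0 :: pvEmit k0 rest) := by
  induction l with
  | nil => intro n; simp [pvRT, PySem.List.enumerate]
  | cons d t ih =>
    intro n
    rw [PySem.List.enumerate_cons]
    by_cases hd : pvKeep d = true
    · have hq : (!pvKeep d) = false := by rw [hd]; rfl
      rw [List.dropWhile_cons_of_neg (by simp [hd]), List.filter_cons_of_pos (by simpa using hd)]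
      rw [pvRT_cons]
      by_cases hRT : pvRT t = []
      · have hnil : (PySem.List.enumerate t (n + 1)).filter (fun p => pvKeep p.2) = [] :=
          (pvKeepNil_iff t _).mpr ((pvRT_nil_iff t).mp hRT)
        simp [hRT, hnil, pvEmit, pvF_of_keep d hd, hd]
      · have hE := pvEmit_eq t n
        simp only [hRT, ite_false]
        simp [pvF_of_keep d hd, hE]
    · have hd' : pvKeep d = false := by revert hd; cases pvKeep d <;> simp
      rw [List.dropWhile_cons_of_pos (by simp [hd']), List.filter_cons_of_neg (by simp [hd'])]
      exact ih (n + 1)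

-- list-level identity: A's substitute-then-strip = B's keep-and-gaps construction
theorem pvCore (l : List Char) :
    PySem.Chars.stripChars (l.map pvF) ['_']
      = (match (PySem.List.enumerate l).filter (fun p => pvKeep p.2) with
         | [] => []
         | (k0, c0) :: rest => c0 :: pvEmit k0 rest) := by
  unfold PySem.Chars.stripChars
  dsimp only
  rw [pvDropWhile_map, ← List.map_reverse, pvDropWhile_map, ← List.map_reverse]
  rw [show ((List.dropWhile (fun c => !pvKeep c)
        ((List.dropWhile (fun c => !pvKeep c) l).reverse)).reverse)
      = pvRT (List.dropWhile (fun c => !pvKeep c) l) from rfl]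
  exact pvMain l 0

-- A's append loop is the map of pvF
theorem pvFoldlAppendMap (l : List Char) :
    l.foldl (fun acc ch =>
        if PySem.Chars.isalnum ch || (ch == '-' || ch == '_') then acc ++ [ch]
        else acc ++ ['_']) []
      = l.map pvF := by
  have hstep : (fun (acc : List Char) ch =>
      if PySem.Chars.isalnum ch || (ch == '-' || ch == '_') then acc ++ [ch]
      else acc ++ ['_']) = (fun acc ch => acc ++ [pvF ch]) := by
    funext acc ch
    by_cases h : pvAllowed ch = true
    · have h' := h; simp only [pvAllowed] at h'
      simp [h', pvF, h]
    · have h' : pvAllowed ch = false := by revert h; cases pvAllowed ch <;> simp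
      have h'' := h'; simp only [pvAllowed] at h''
      simp [h'', pvF, h']
  rw [hstep, PySem.List.foldl_append_singleton_eq_map]
  simp

-- "".join = flatten
theorem pvIntercalateNil (xss : List (List Char)) :
    List.intercalate ([] : List Char) xss = xss.flatten := by
  induction xss with
  | nil => simp [List.intercalate]
  | cons x xs ih =>
    cases xs with
    | nil => simp [List.intercalate]
    | cons y ys =>
      simp only [List.intercalate] at *
      simp [List.intersperse] at *
      simp [ih]

-- B's fold over consecutive pairs flattens to pvEmit
theorem pvJoinFold (ks : List (Int × Char)) : ∀ (p : Int × Char) (acc : List String),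
    ((((p :: ks).zip ks).foldl
        (fun acc q =>
          acc ++ [String.ofList (List.replicate (q.2.1 - q.1.1 - 1).toNat '_'),
                  String.ofList [q.2.2]]) acc).map String.toList).flatten
      = (acc.map String.toList).flatten ++ pvEmit p.1 ks := by
  induction ks with
  | nil => intro p acc; simp [pvEmit]
  | cons q ks ih =>
    intro p acc
    rw [List.zip_cons_cons, List.foldl_cons]
    rw [ih q]
    simp only [pvEmit, List.map_append, List.flatten_append]
    simp [List.append_assoc]

-- ===== VERDICT (by name: the statement is the Claim_ definition above) =====
set_option maxHeartbeats 1000000 in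
theorem audit_file_tag_py_spec : Claim_equal_audit_file_tag_py := by
  intro v _
  unfold Spec_audit_file_tag_py audit_file_tag_py audit_file_tag_py_alt
  dsimp only
  apply String.toList_inj.mp
  have hkeep : (fun (p : Int × Char) => PySem.Chars.isalnum p.2 || p.2 == '-')
      = (fun (p : Int × Char) => pvKeep p.2) := rfl
  rw [hkeep]
  by_cases h : PySem.Str.strip (if v == "" then "" else v) == ""
  · rw [eq_of_beq h]
    simp [PySem.List.enumerate_nil]
  · simp only [h, Bool.false_eq_true, ite_false]
    rw [pvFoldlAppendMap, PySem.Str.toList_stripChars]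
    rw [show (String.ofList ((PySem.Str.strip (if v == "" then "" else v)).toList.map pvF)).toList
          = (PySem.Str.strip (if v == "" then "" else v)).toList.map pvF from by simp]
    rw [show ("_" : String).toList = ['_'] from by decide]
    rw [pvCore]
    cases hK : (PySem.List.enumerate (PySem.Str.strip (if v == "" then "" else v)).toList).filter
        (fun p => pvKeep p.2) with
    | nil => rfl
    | cons p rest =>
      obtain ⟨k0, c0⟩ := p
      dsimp only
      rw [PySem.Str.toList_join]
      rw [show ("" : String).toList = ([] : List Char) from by decide]
      rw [show PySem.Chars.join ([] : List Char) = List.intercalate ([] : List Char) from rfl]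
      rw [pvIntercalateNil, pvJoinFold rest (k0, c0) [String.ofList [c0]]]
      simp
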